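-- pv_equiv track=rewrite | github.com/Pedro-V/prog-problems | uva/12150/main.py | try_build_initial_grid
-- ===== SOURCE A (Python) =====
-- def try_build_initial_grid(n, pole):
--     initial_grid = [0] * n
--     for i in range(n):
--         car_num, change = pole[i]
--         initial_pos = i + change
--         if initial_pos < 0 or initial_pos >= n or initial_grid[initial_pos] != 0:
--             return []
--         initial_grid[initial_pos] = car_num
--     return initial_grid
-- ===== SOURCE B (Python) =====
-- def try_build_initial_grid(n, pole):
--     positions = [i + pole[i][1] for i in range(n)]
--     if any(p < 0 or p >= n for p in positions):
--         return []
--     if len(set(positions)) != len(positions):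
--         return []
--     grid = [0] * n
--     for i, p in enumerate(positions):
--         grid[p] = pole[i][0]
--     return grid
-- ===== Notes on version B (the rewrite author's own statement) =====
-- stated objective: alternative
-- what changed: A's single interleaved mark-and-detect loop with early return is replaced by a multi-pass structure: compute all target positions, validate range with any(), detect collisions by comparing len(set(positions)) to len(positions), then scatter the car numbers into a fresh grid.
-- intended difference: On inputs where all target positions are in range but some positions collide and every earlier car of each colliding pair is numbered 0, A's grid[pos] != 0 test misses the collision and returns a grid (later cars silently overwrite), while B returns [] as for any collision, which is the intended behaviour (a shared cell is a collision regardless of car numbers). — e.g. on try_build_initial_grid(2, [(0, 1), (5, 0)]): A returns [0, 5], B returns []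
-- outside the precondition, e.g. on try_build_initial_grid(3, [(1, 5)]): A returns [], B raises IndexError
import Mathlib
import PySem

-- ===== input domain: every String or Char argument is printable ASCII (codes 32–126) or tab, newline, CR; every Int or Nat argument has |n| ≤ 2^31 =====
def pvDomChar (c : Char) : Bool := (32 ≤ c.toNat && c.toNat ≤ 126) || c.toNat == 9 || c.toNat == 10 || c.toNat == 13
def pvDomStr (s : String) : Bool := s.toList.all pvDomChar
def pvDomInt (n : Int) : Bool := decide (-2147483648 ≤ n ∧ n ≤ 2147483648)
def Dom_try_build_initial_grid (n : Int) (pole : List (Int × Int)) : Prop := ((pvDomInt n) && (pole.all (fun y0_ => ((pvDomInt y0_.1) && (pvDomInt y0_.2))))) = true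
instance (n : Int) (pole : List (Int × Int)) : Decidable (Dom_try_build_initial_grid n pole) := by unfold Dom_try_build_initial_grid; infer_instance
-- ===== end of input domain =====

-- B replaces A's single interleaved mark-and-detect loop by compute-positions / validate-range /
-- detect-duplicates-with-a-set / scatter; on the corner where A misses a collision behind a car
-- numbered 0 (D_ below) B intentionally returns [].

-- ===== PORT A =====
-- A's for-loop with its early returns; grid indexing/assignment is exact: the or-chain guards it in range
def tbigA_go (n : Int) (pole : List (Int × Int)) : List Int → List Int → List Int
  | grid, [] => grid
  | grid, i :: rest =>
    match PySem.List.pyGet? pole i with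
    | none => []   -- pole[i] would raise IndexError; excluded by Pre_
    | some pc =>
      let pos := i + pc.2
      if pos < 0 ∨ n ≤ pos then []
      else if PySem.List.pyGetD grid pos 0 ≠ 0 then []
      else tbigA_go n pole (PySem.List.pySetD grid pos pc.1) rest

def try_build_initial_grid (n : Int) (pole : List (Int × Int)) : List Int :=
  tbigA_go n pole (List.replicate n.toNat 0) (PySem.List.pyRange 0 n 1)

-- ===== PORT B =====
-- pole[i] via pyGetD is exact under Pre_ (i < len(pole)); grid[p] = ... is exact: p validated in range
def try_build_initial_grid_alt (n : Int) (pole : List (Int × Int)) : List Int :=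
  let positions := (PySem.List.pyRange 0 n 1).map (fun i => i + (PySem.List.pyGetD pole i (0, 0)).2)
  if positions.any (fun p => decide (p < 0) || decide (n ≤ p)) then []
  else if (PySem.Set.ofList positions).length ≠ positions.length then []
  else (PySem.List.enumerate positions).foldl
        (fun grid ip => PySem.List.pySetD grid ip.2 (PySem.List.pyGetD pole ip.1 (0, 0)).1)
        (List.replicate n.toNat 0)

-- ===== PRECONDITION & SPEC =====
-- Pre_ excludes n > len(pole): there A either raises IndexError (when the loop reaches a missing
-- index) or happens to return [] after an earlier failed placement, while B (which reads all of
-- pole[0..n-1] before validating anything) raises IndexError.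
def Pre_try_build_initial_grid (n : Int) (pole : List (Int × Int)) : Prop :=
  n ≤ (pole.length : Int)
instance (n : Int) (pole : List (Int × Int)) : Decidable (Pre_try_build_initial_grid n pole) := by
  unfold Pre_try_build_initial_grid; infer_instance

def pvWitness_try_build_initial_grid : Int × (List (Int × Int)) := (2, [(1, 1), (2, -1)])

-- On inputs where all target positions are in range but some positions collide and every earlier
-- car of each colliding pair is numbered 0, A's `grid[pos] != 0` test misses the collision and
-- returns a grid (later cars silently overwrite), while B returns [] as for any collision, which
-- is the intended behaviour (a shared cell is a collision regardless of car numbers).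
def D_try_build_initial_grid (n : Int) (pole : List (Int × Int)) : Prop :=
  let q := (pole.take n.toNat).zipIdx.map fun c => Int.ofNat c.2 + c.1.2
  ¬ q.Nodup ∧ List.Pairwise (fun a b => a.1 = b.1 → a.2.1 = 0) (q.zip pole) ∧
    ∀ x ∈ q, x % n = x
instance (n : Int) (pole : List (Int × Int)) : Decidable (D_try_build_initial_grid n pole) := by
  unfold D_try_build_initial_grid; infer_instance

def Spec_try_build_initial_grid (n : Int) (pole : List (Int × Int)) (out : List Int) : Prop :=
  ¬ D_try_build_initial_grid n pole → out = try_build_initial_grid_alt n pole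
instance (n : Int) (pole : List (Int × Int)) (out : List Int) : Decidable (Spec_try_build_initial_grid n pole out) := by
  unfold Spec_try_build_initial_grid; infer_instance

def pvDiffWitness_try_build_initial_grid : Int × (List (Int × Int)) := (2, [(0, 1), (5, 0)])
def pvDiffWitnessOut_try_build_initial_grid : (List Int) × (List Int) := ([0, 5], [])

-- ===== CLAIM (what is proved, stated in full; the proofs are below) =====
def Claim_unchanged_try_build_initial_grid : Prop := ∀ (n : Int) (pole : List (Int × Int)), Dom_try_build_initial_grid n pole → Pre_try_build_initial_grid n pole → Spec_try_build_initial_grid n pole (try_build_initial_grid n pole)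
def Claim_changed_try_build_initial_grid : Prop := Dom_try_build_initial_grid (pvDiffWitness_try_build_initial_grid.1) (pvDiffWitness_try_build_initial_grid.2) ∧ Pre_try_build_initial_grid (pvDiffWitness_try_build_initial_grid.1) (pvDiffWitness_try_build_initial_grid.2) ∧ D_try_build_initial_grid (pvDiffWitness_try_build_initial_grid.1) (pvDiffWitness_try_build_initial_grid.2) ∧ try_build_initial_grid (pvDiffWitness_try_build_initial_grid.1) (pvDiffWitness_try_build_initial_grid.2) = pvDiffWitnessOut_try_build_initial_grid.1 ∧ try_build_initial_grid_alt (pvDiffWitness_try_build_initial_grid.1) (pvDiffWitness_try_build_initial_grid.2) = pvDiffWitnessOut_try_build_initial_grid.2 ∧ pvDiffWitnessOut_try_build_initial_grid.1 ≠ pvDiffWitnessOut_try_build_initial_grid.2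
def Claim_exact_try_build_initial_grid : Prop := ∀ (n : Int) (pole : List (Int × Int)), Dom_try_build_initial_grid n pole → Pre_try_build_initial_grid n pole → D_try_build_initial_grid n pole → try_build_initial_grid n pole ≠ try_build_initial_grid_alt n pole

-- ===== LEMMAS AND PROOFS =====

-- the target position / car number of car i (proof-side views of the input)
def pvPos (pole : List (Int × Int)) (i : Nat) : Int := (i : Int) + (pole.getD i (0, 0)).2
def pvCar (pole : List (Int × Int)) (i : Nat) : Int := (pole.getD i (0, 0)).1

-- the grid after the first k cars are (unconditionally) scattered
def pvStep (pole : List (Int × Int)) (g : List Int) (i : Nat) : List Int :=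
  PySem.List.pySetD g (pvPos pole i) (pvCar pole i)

def pvBuild (n : Int) (pole : List (Int × Int)) (k : Nat) : List Int :=
  (List.range k).foldl (pvStep pole) (List.replicate n.toNat 0)

-- step j of A fails (relative to the scatter grids)
def pvBad (n : Int) (pole : List (Int × Int)) (j : Nat) : Prop :=
  pvPos pole j < 0 ∨ n ≤ pvPos pole j ∨ PySem.List.pyGetD (pvBuild n pole j) (pvPos pole j) 0 ≠ 0

lemma pvBuild_succ (n : Int) (pole : List (Int × Int)) (k : Nat) :
    pvBuild n pole (k+1) = pvStep pole (pvBuild n pole k) k := by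
  unfold pvBuild
  rw [List.range_succ, List.foldl_append, List.foldl_cons, List.foldl_nil]

lemma pvBuild_length (n : Int) (pole : List (Int × Int)) (k : Nat) :
    (pvBuild n pole k).length = n.toNat := by
  induction k with
  | zero => simp [pvBuild]
  | succ k ih => rw [pvBuild_succ]; simpa [pvStep, PySem.List.length_pySetD] using ih

lemma pyGetD_replicate_zero (m : Nat) (p : Int) :
    PySem.List.pyGetD (List.replicate m (0:Int)) p 0 = 0 := by
  by_cases hr : PySem.Raise.InRange (List.replicate m (0:Int)).length p
  · have := PySem.List.pyGetD_mem (xs := List.replicate m (0:Int)) (i := p) (d := 0) hr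
    exact List.eq_of_mem_replicate this
  · have hnone : PySem.List.pyGet? (List.replicate m (0:Int)) p = none :=
      (PySem.List.pyGet?_eq_none_iff _ _).mpr hr
    exact PySem.List.pyGetD_of_none _ _ _ hnone

lemma build_get_self (n : Int) (pole : List (Int × Int)) (k : Nat)
    (h0 : 0 ≤ pvPos pole k) (h1 : pvPos pole k < n) :
    PySem.List.pyGetD (pvBuild n pole (k+1)) (pvPos pole k) 0 = pvCar pole k := by
  rw [pvBuild_succ]
  unfold pvStep
  have hcast : pvPos pole k = (((pvPos pole k).toNat : Nat) : Int) := by omega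
  rw [hcast]
  rw [PySem.List.pyGetD_pySetD_natCast]
  · simp
  · rw [pvBuild_length]; omega

lemma build_get_other (n : Int) (pole : List (Int × Int)) (k : Nat) (p : Int)
    (h0 : 0 ≤ pvPos pole k) (h1 : pvPos pole k < n) (h0p : 0 ≤ p) (hne : p ≠ pvPos pole k) :
    PySem.List.pyGetD (pvBuild n pole (k+1)) p 0 = PySem.List.pyGetD (pvBuild n pole k) p 0 := by
  rw [pvBuild_succ]
  unfold pvStep
  have hcast : pvPos pole k = (((pvPos pole k).toNat : Nat) : Int) := by omega
  have hcastp : p = ((p.toNat : Nat) : Int) := by omega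
  rw [hcast, hcastp]
  rw [PySem.List.pyGetD_pySetD_natCast _ _ _ _ _ (by rw [pvBuild_length]; omega)]
  rw [if_neg (by omega)]

lemma build_nz (n : Int) (pole : List (Int × Int)) :
    ∀ j, (∀ i, i < j → 0 ≤ pvPos pole i ∧ pvPos pole i < n) → ∀ p : Int, 0 ≤ p →
      PySem.List.pyGetD (pvBuild n pole j) p 0 ≠ 0 →
      ∃ i, i < j ∧ pvPos pole i = p ∧ pvCar pole i ≠ 0 := by
  intro j
  induction j with
  | zero =>
    intro _ p _ hp
    exact absurd (pyGetD_replicate_zero n.toNat p) hp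
  | succ j ih =>
    intro hin p h0p hp
    have hj := hin j (by omega)
    by_cases hpe : p = pvPos pole j
    · subst hpe
      rw [build_get_self n pole j hj.1 hj.2] at hp
      exact ⟨j, by omega, rfl, hp⟩
    · rw [build_get_other n pole j p hj.1 hj.2 h0p hpe] at hp
      obtain ⟨i, hi, h1, h2⟩ := ih (fun i hi => hin i (by omega)) p h0p hp
      exact ⟨i, by omega, h1, h2⟩

lemma build_unchanged (n : Int) (pole : List (Int × Int)) (p : Int) (h0p : 0 ≤ p) :
    ∀ a b, a ≤ b →
      (∀ i, a ≤ i → i < b → (0 ≤ pvPos pole i ∧ pvPos pole i < n) ∧ pvPos pole i ≠ p) →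
      PySem.List.pyGetD (pvBuild n pole b) p 0 = PySem.List.pyGetD (pvBuild n pole a) p 0 := by
  intro a b
  induction b with
  | zero => intro hab _; have : a = 0 := by omega
            subst this; rfl
  | succ b ih =>
    intro hab h
    rcases Nat.lt_or_ge a (b+1) with hlt | hge
    · have hb := h b (by omega) (by omega)
      rw [build_get_other n pole b p hb.1.1 hb.1.2 h0p (fun he => hb.2 he.symm)]
      exact ih (by omega) (fun i h1 h2 => h i h1 (by omega))
    · have : a = b + 1 := by omega
      subst this; rfl

-- existence of a failing step from an undetected-by-range collision with a nonzero earlier car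
lemma bad_of_dupnz (n : Int) (pole : List (Int × Int))
    (hin : ∀ i, i < n.toNat → 0 ≤ pvPos pole i ∧ pvPos pole i < n)
    (h : ∃ j, j < n.toNat ∧ ∃ i, i < j ∧ pvPos pole i = pvPos pole j ∧ pvCar pole i ≠ 0) :
    ∃ j, j < n.toNat ∧ pvBad n pole j := by
  obtain ⟨j, hjm, i, hij, heq, hcar⟩ := h
  have hP : ∃ t, i < t ∧ t < n.toNat ∧ pvPos pole t = pvPos pole i := ⟨j, hij, hjm, heq.symm⟩
  have hspec := Nat.find_spec hP
  refine ⟨Nat.find hP, hspec.2.1, ?_⟩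
  right; right
  rw [hspec.2.2]
  have h0p : 0 ≤ pvPos pole i := (hin i (by omega)).1
  have hstep : PySem.List.pyGetD (pvBuild n pole (Nat.find hP)) (pvPos pole i) 0
      = PySem.List.pyGetD (pvBuild n pole (i+1)) (pvPos pole i) 0 := by
    apply build_unchanged n pole _ h0p
    · omega
    · intro t h1 h2
      refine ⟨hin t (by omega), fun he => ?_⟩
      exact Nat.find_min hP h2 ⟨by omega, by omega, he⟩
  rw [hstep, build_get_self n pole i (hin i (by omega)).1 (hin i (by omega)).2]
  exact hcar

-- ----- A's loop characterised -----

lemma go_cons (n : Int) (pole : List (Int × Int)) (hpre : n ≤ (pole.length : Int))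
    (k : Nat) (hk : k < n.toNat) (g : List Int) :
    tbigA_go n pole g (PySem.List.pyRange (k : Int) n 1) =
      (if pvPos pole k < 0 ∨ n ≤ pvPos pole k then []
       else if PySem.List.pyGetD g (pvPos pole k) 0 ≠ 0 then []
       else tbigA_go n pole (PySem.List.pySetD g (pvPos pole k) (pvCar pole k))
              (PySem.List.pyRange ((k : Int) + 1) n 1)) := by
  have hn : (k : Int) < n := by omega
  have hkl : k < pole.length := by omega
  rw [PySem.List.pyRange_one_cons hn]
  show (match PySem.List.pyGet? pole (k : Int) with
    | none => []
    | some pc =>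
      if (k : Int) + pc.2 < 0 ∨ n ≤ (k : Int) + pc.2 then []
      else if PySem.List.pyGetD g ((k : Int) + pc.2) 0 ≠ 0 then []
      else tbigA_go n pole (PySem.List.pySetD g ((k : Int) + pc.2) pc.1)
             (PySem.List.pyRange ((k : Int) + 1) n 1)) = _
  rw [PySem.List.pyGet?_natCast, List.getElem?_eq_getElem hkl]
  have hpos : (k : Int) + pole[k].2 = pvPos pole k := by
    unfold pvPos; rw [List.getD_eq_getElem _ _ hkl]
  have hcar : pole[k].1 = pvCar pole k := by
    unfold pvCar; rw [List.getD_eq_getElem _ _ hkl]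
  simp only [hpos, hcar]

lemma go_nil (n : Int) (pole : List (Int × Int)) (g : List Int) :
    tbigA_go n pole g (PySem.List.pyRange (n.toNat : Int) n 1) = g := by
  rw [PySem.List.pyRange_one_eq_nil (by omega)]
  rfl

lemma go_fail (n : Int) (pole : List (Int × Int)) (hpre : n ≤ (pole.length : Int)) :
    ∀ d k, k + d = n.toNat → (∃ j, k ≤ j ∧ j < n.toNat ∧ pvBad n pole j) →
      tbigA_go n pole (pvBuild n pole k) (PySem.List.pyRange (k : Int) n 1) = [] := by
  intro d
  induction d with
  | zero =>
    intro k hk ⟨j, h1, h2, _⟩; omega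
  | succ d ih =>
    intro k hk hex
    obtain ⟨j, hkj, hjm, hbad⟩ := hex
    rw [go_cons n pole hpre k (by omega)]
    by_cases c1 : pvPos pole k < 0 ∨ n ≤ pvPos pole k
    · rw [if_pos c1]
    · rw [if_neg c1]
      by_cases c2 : PySem.List.pyGetD (pvBuild n pole k) (pvPos pole k) 0 ≠ 0
      · rw [if_pos c2]
      · rw [if_neg c2]
        have hnb : ¬ pvBad n pole k := by unfold pvBad; tauto
        have hkj' : k + 1 ≤ j := by
          rcases Nat.lt_or_ge k j with h | h
          · omega
          · have : k = j := by omega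
            subst this; exact absurd hbad hnb
        have : PySem.List.pySetD (pvBuild n pole k) (pvPos pole k) (pvCar pole k)
            = pvBuild n pole (k+1) := (pvBuild_succ n pole k).symm
        rw [this]
        have : ((k : Int) + 1) = ((k + 1 : Nat) : Int) := by omega
        rw [this]
        exact ih (k+1) (by omega) ⟨j, hkj', hjm, hbad⟩

lemma go_ok (n : Int) (pole : List (Int × Int)) (hpre : n ≤ (pole.length : Int)) :
    ∀ d k, k + d = n.toNat → (∀ j, k ≤ j → j < n.toNat → ¬ pvBad n pole j) →
      tbigA_go n pole (pvBuild n pole k) (PySem.List.pyRange (k : Int) n 1)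
        = pvBuild n pole n.toNat := by
  intro d
  induction d with
  | zero =>
    intro k hk _
    have : k = n.toNat := by omega
    subst this; exact go_nil n pole _
  | succ d ih =>
    intro k hk hall
    have hnb : ¬ pvBad n pole k := hall k (by omega) (by omega)
    unfold pvBad at hnb
    push Not at hnb
    rw [go_cons n pole hpre k (by omega)]
    rw [if_neg (by omega)]
    rw [if_neg (by simpa using hnb.2.2)]
    have : PySem.List.pySetD (pvBuild n pole k) (pvPos pole k) (pvCar pole k)
        = pvBuild n pole (k+1) := (pvBuild_succ n pole k).symm
    rw [this]
    have h2 : ((k : Int) + 1) = ((k + 1 : Nat) : Int) := by omega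
    rw [h2]
    exact ih (k+1) (by omega) (fun j h1 h3 => hall j (by omega) h3)

lemma A_eq_nil (n : Int) (pole : List (Int × Int)) (hpre : n ≤ (pole.length : Int))
    (h : ∃ j, j < n.toNat ∧ pvBad n pole j) : try_build_initial_grid n pole = [] := by
  obtain ⟨j, h1, h2⟩ := h
  unfold try_build_initial_grid
  exact go_fail n pole hpre n.toNat 0 (by omega) ⟨j, by omega, h1, h2⟩

lemma A_eq_build (n : Int) (pole : List (Int × Int)) (hpre : n ≤ (pole.length : Int))
    (h : ∀ j, j < n.toNat → ¬ pvBad n pole j) :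
    try_build_initial_grid n pole = pvBuild n pole n.toNat := by
  unfold try_build_initial_grid
  exact go_ok n pole hpre n.toNat 0 (by omega) (fun j _ h3 => h j h3)

-- ----- B characterised -----

def pvPositions (n : Int) (pole : List (Int × Int)) : List Int :=
  (PySem.List.pyRange 0 n 1).map (fun i => i + (PySem.List.pyGetD pole i (0, 0)).2)

lemma pvPositions_length (n : Int) (pole : List (Int × Int)) :
    (pvPositions n pole).length = n.toNat := by
  unfold pvPositions
  rw [List.length_map, PySem.List.length_pyRange_one]
  omega

lemma pvPositions_get (n : Int) (pole : List (Int × Int)) (j : Nat)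
    (hj : j < (pvPositions n pole).length) : (pvPositions n pole)[j] = pvPos pole j := by
  have hjm : j < n.toNat := by rw [pvPositions_length] at hj; exact hj
  unfold pvPositions
  rw [List.getElem_map]
  rw [PySem.List.getElem_pyRange_one]
  have : (0 : Int) + (j : Int) = ((j : Nat) : Int) := by omega
  rw [this, PySem.List.pyGetD_natCast]
  rfl

lemma pvPositions_mem_iff (n : Int) (pole : List (Int × Int)) (P : Int → Prop) :
    (∃ x ∈ pvPositions n pole, P x) ↔ ∃ j, j < n.toNat ∧ P (pvPos pole j) := by
  constructor
  · rintro ⟨x, hx, hP⟩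
    obtain ⟨j, hj, rfl⟩ := List.mem_iff_getElem.mp hx
    exact ⟨j, by rw [pvPositions_length] at hj; exact hj, by rwa [pvPositions_get n pole j hj] at hP⟩
  · rintro ⟨j, hj, hP⟩
    have hj' : j < (pvPositions n pole).length := by rw [pvPositions_length]; exact hj
    exact ⟨(pvPositions n pole)[j], List.getElem_mem hj', by rwa [pvPositions_get n pole j hj']⟩

lemma ofList_exists_sublist {α : Type} [BEq α] [LawfulBEq α] :
    ∀ (xs s : List α), ∃ t, xs.foldl PySem.Set.add s = s ++ t ∧ t.Sublist xs := by
  intro xs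
  induction xs with
  | nil => intro s; exact ⟨[], by simp, List.Sublist.refl _⟩
  | cons x xs ih =>
    intro s
    rw [List.foldl_cons]
    by_cases hx : PySem.Set.contains s x
    · have hxs : x ∈ s := (PySem.Set.contains_iff s x).mp hx
      have : PySem.Set.add s x = s := by simp [PySem.Set.add, hxs]
      rw [this]
      obtain ⟨t, h1, h2⟩ := ih s
      exact ⟨t, h1, h2.cons x⟩
    · have : PySem.Set.add s x = s ++ [x] := by
        simp only [PySem.Set.add]
        rw [if_neg (by simpa using hx)]
      rw [this]
      obtain ⟨t, h1, h2⟩ := ih (s ++ [x])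
      exact ⟨x :: t, by simpa using h1, h2.cons₂ x⟩

lemma ofList_length_eq_iff {α : Type} [BEq α] [LawfulBEq α] (xs : List α) :
    (PySem.Set.ofList xs).length = xs.length ↔ xs.Nodup := by
  constructor
  · intro h
    obtain ⟨t, h1, h2⟩ := ofList_exists_sublist xs ([] : List α)
    have hofl : PySem.Set.ofList xs = t := by rw [PySem.Set.ofList_eq_foldl, h1]; rfl
    have : t = xs := h2.eq_of_length (by rw [← hofl, h])
    rw [← this, ← hofl]
    exact PySem.Set.nodup_ofList xs
  · intro h
    rw [PySem.Set.ofList_eq_self_of_nodup xs h]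

lemma nodup_pvPositions_iff (n : Int) (pole : List (Int × Int)) :
    (pvPositions n pole).Nodup ↔
      ∀ j, j < n.toNat → ∀ i, i < j → pvPos pole i ≠ pvPos pole j := by
  rw [List.Nodup, List.pairwise_iff_getElem]
  constructor
  · intro h j hj i hij
    have hj' : j < (pvPositions n pole).length := by rw [pvPositions_length]; exact hj
    have hi' : i < (pvPositions n pole).length := by omega
    have := h i j hi' hj' hij
    rwa [pvPositions_get n pole i hi', pvPositions_get n pole j hj'] at this
  · intro h i j hi hj hij
    rw [pvPositions_get n pole i hi, pvPositions_get n pole j hj]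
    exact h j (by rw [pvPositions_length] at hj; exact hj) i hij

lemma scatter_eq (n : Int) (pole : List (Int × Int)) :
    (PySem.List.enumerate (pvPositions n pole)).foldl
        (fun grid ip => PySem.List.pySetD grid ip.2 (PySem.List.pyGetD pole ip.1 (0, 0)).1)
        (List.replicate n.toNat 0)
      = pvBuild n pole n.toNat := by
  rw [PySem.List.enumerate_eq_map_pyRange (d := 0)]
  simp only [PySem.List.len_eq]
  rw [pvPositions_length]
  rw [PySem.List.pyRange_one]
  simp only [Int.sub_zero, Int.toNat_natCast]
  rw [List.map_map, List.foldl_map]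
  unfold pvBuild
  apply PySem.List.foldl_congr_mem
  intro acc k hk
  have hkm : k < n.toNat := List.mem_range.mp hk
  have hk' : k < (pvPositions n pole).length := by rw [pvPositions_length]; exact hkm
  simp only [Function.comp]
  have h1 : ((0 : Int) + (k : Int)) = ((k : Nat) : Int) := by omega
  show PySem.List.pySetD acc (PySem.List.pyGetD (pvPositions n pole) ((0:Int) + k) 0)
        (PySem.List.pyGetD pole ((0:Int) + k) (0,0)).1 = pvStep pole acc k
  rw [h1, PySem.List.pyGetD_natCast, PySem.List.pyGetD_natCast]
  rw [List.getD_eq_getElem _ _ hk', pvPositions_get n pole k hk']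
  rfl

lemma B_cases (n : Int) (pole : List (Int × Int)) :
    try_build_initial_grid_alt n pole =
      (if ∃ j, j < n.toNat ∧ (pvPos pole j < 0 ∨ n ≤ pvPos pole j) then []
       else if ¬ (pvPositions n pole).Nodup then []
       else pvBuild n pole n.toNat) := by
  unfold try_build_initial_grid_alt
  show (if (pvPositions n pole).any (fun p => decide (p < 0) || decide (n ≤ p)) then []
        else if (PySem.Set.ofList (pvPositions n pole)).length ≠ (pvPositions n pole).length then []
        else _) = _
  have hany : (pvPositions n pole).any (fun p => decide (p < 0) || decide (n ≤ p)) = true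
      ↔ ∃ j, j < n.toNat ∧ (pvPos pole j < 0 ∨ n ≤ pvPos pole j) := by
    rw [List.any_eq_true]
    have := pvPositions_mem_iff n pole (fun x => x < 0 ∨ n ≤ x)
    simpa using this
  have hdup : ((PySem.Set.ofList (pvPositions n pole)).length ≠ (pvPositions n pole).length)
      ↔ ¬ (pvPositions n pole).Nodup := not_congr (ofList_length_eq_iff _)
  by_cases h1 : ∃ j, j < n.toNat ∧ (pvPos pole j < 0 ∨ n ≤ pvPos pole j)
  · rw [if_pos (hany.mpr h1), if_pos h1]
  · rw [if_neg (fun hc => h1 (hany.mp hc)), if_neg h1]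
    by_cases h2 : (pvPositions n pole).Nodup
    · rw [if_neg (fun hc => (hdup.mp hc) h2), if_neg (by simpa using h2)]
      exact scatter_eq n pole
    · rw [if_pos (hdup.mpr h2), if_pos (by simpa using h2)]

-- A never fails when positions are in range and each repeated cell only ever holds car 0
lemma A_ok_of_D_like (n : Int) (pole : List (Int × Int))
    (hin : ∀ i, i < n.toNat → 0 ≤ pvPos pole i ∧ pvPos pole i < n)
    (hz : ∀ j, j < n.toNat → ∀ i, i < j → pvPos pole i = pvPos pole j → pvCar pole i = 0) :
    ∀ j, j < n.toNat → ¬ pvBad n pole j := by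
  intro j hj hbad
  rcases hbad with h | h | h
  · have := hin j hj; omega
  · have := hin j hj; omega
  · obtain ⟨i, hij, heq, hcar⟩ := build_nz n pole j (fun i hi => hin i (by omega)) _ (hin j hj).1 h
    exact hcar (hz j hj i hij heq)


-- ----- D_ restated through pvPos/pvCar -----

def pvQ (n : Int) (pole : List (Int × Int)) : List Int :=
  (pole.take n.toNat).zipIdx.map fun c => Int.ofNat c.2 + c.1.2

lemma pvQ_length (n : Int) (pole : List (Int × Int)) (hm : n.toNat ≤ pole.length) :
    (pvQ n pole).length = n.toNat := by
  simp [pvQ]; omega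

lemma pvQ_get (n : Int) (pole : List (Int × Int)) (i : Nat) (h : i < (pvQ n pole).length) :
    (pvQ n pole)[i] = pvPos pole i := by
  have him : i < pole.length := by simp [pvQ] at h; omega
  simp only [pvQ, List.getElem_map, List.getElem_zipIdx, List.getElem_take]
  unfold pvPos
  rw [List.getD_eq_getElem _ _ him]
  simp

lemma pvQ_nodup_iff (n : Int) (pole : List (Int × Int)) (hm : n.toNat ≤ pole.length) :
    (pvQ n pole).Nodup ↔
      ∀ j, j < n.toNat → ∀ i, i < j → pvPos pole i ≠ pvPos pole j := by
  rw [List.Nodup, List.pairwise_iff_getElem]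
  constructor
  · intro h j hj i hij
    have hj' : j < (pvQ n pole).length := by rw [pvQ_length n pole hm]; exact hj
    have hi' : i < (pvQ n pole).length := by omega
    have := h i j hi' hj' hij
    rwa [pvQ_get n pole i hi', pvQ_get n pole j hj'] at this
  · intro h i j hi hj hij
    rw [pvQ_get n pole i hi, pvQ_get n pole j hj]
    exact h j (by rw [pvQ_length n pole hm] at hj; exact hj) i hij

lemma pvQZ_pairwise_iff (n : Int) (pole : List (Int × Int)) (hm : n.toNat ≤ pole.length) :
    ((pvQ n pole).zip pole).Pairwise (fun a b => a.1 = b.1 → a.2.1 = 0) ↔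
      ∀ j, j < n.toNat → ∀ i, i < j → pvPos pole i = pvPos pole j → pvCar pole i = 0 := by
  have hlen : ((pvQ n pole).zip pole).length = n.toNat := by
    rw [List.length_zip, pvQ_length n pole hm]; omega
  have hget : ∀ (i : Nat) (h : i < ((pvQ n pole).zip pole).length),
      ((pvQ n pole).zip pole)[i] = (pvPos pole i, pole[i]'(by omega)) := by
    intro i h
    have hi : i < (pvQ n pole).length := by rw [pvQ_length n pole hm]; omega
    rw [List.getElem_zip, pvQ_get n pole i hi]
  have hcar : ∀ (i : Nat) (hi : i < pole.length), (pole[i]'hi).1 = pvCar pole i := by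
    intro i hi
    unfold pvCar
    rw [List.getD_eq_getElem _ _ hi]
  rw [List.pairwise_iff_getElem]
  constructor
  · intro h j hj i hij heq
    have hj' : j < ((pvQ n pole).zip pole).length := by omega
    have hi' : i < ((pvQ n pole).zip pole).length := by omega
    have := h i j hi' hj' hij
    rw [hget i hi', hget j hj'] at this
    have hip : i < pole.length := by omega
    rw [← hcar i hip]
    exact this heq
  · intro h i j hi hj hij
    rw [hget i hi, hget j hj]
    intro heq
    have hip : i < pole.length := by omega
    rw [hcar i hip]
    exact h j (by omega) i hij heq

lemma pvQ_range_iff (n : Int) (pole : List (Int × Int)) (hm : n.toNat ≤ pole.length) :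
    (∀ x ∈ pvQ n pole, x % n = x) ↔
      ∀ i, i < n.toNat → 0 ≤ pvPos pole i ∧ pvPos pole i < n := by
  constructor
  · intro h i hi
    have hn : 0 < n := by omega
    have hi' : i < (pvQ n pole).length := by rw [pvQ_length n pole hm]; exact hi
    have := h _ (List.getElem_mem hi')
    rw [pvQ_get n pole i hi'] at this
    constructor
    · rw [← this]; exact Int.emod_nonneg _ (by omega)
    · rw [← this]; exact Int.emod_lt_of_pos _ hn
  · intro h x hx
    obtain ⟨i, hi, rfl⟩ := List.mem_iff_getElem.mp hx
    rw [pvQ_get n pole i hi]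
    have := h i (by rw [pvQ_length n pole hm] at hi; exact hi)
    exact Int.emod_eq_of_lt this.1 this.2

lemma D_iff (n : Int) (pole : List (Int × Int)) (hpre : n ≤ (pole.length : Int)) :
    D_try_build_initial_grid n pole ↔
      ((∀ i, i < n.toNat → 0 ≤ pvPos pole i ∧ pvPos pole i < n) ∧
       (∃ j, j < n.toNat ∧ ∃ i, i < j ∧ pvPos pole i = pvPos pole j) ∧
       (∀ j, j < n.toNat → ∀ i, i < j → pvPos pole i = pvPos pole j → pvCar pole i = 0)) := by
  have hm : n.toNat ≤ pole.length := by omega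
  have h0 : D_try_build_initial_grid n pole ↔
      (¬ (pvQ n pole).Nodup ∧
       ((pvQ n pole).zip pole).Pairwise (fun a b => a.1 = b.1 → a.2.1 = 0) ∧
       ∀ x ∈ pvQ n pole, x % n = x) := Iff.rfl
  rw [h0]
  constructor
  · rintro ⟨h1, h2, h3⟩
    refine ⟨(pvQ_range_iff n pole hm).mp h3, ?_, (pvQZ_pairwise_iff n pole hm).mp h2⟩
    have := (pvQ_nodup_iff n pole hm).not.mp h1
    push Not at this
    obtain ⟨j, hj, i, hij, heq⟩ := this
    exact ⟨j, hj, i, hij, heq⟩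
  · rintro ⟨hin, hdup, hz⟩
    refine ⟨?_, (pvQZ_pairwise_iff n pole hm).mpr hz, (pvQ_range_iff n pole hm).mpr hin⟩
    rw [(pvQ_nodup_iff n pole hm).not]
    push Not
    obtain ⟨j, hj, i, hij, heq⟩ := hdup
    exact ⟨j, hj, i, hij, heq⟩

-- ----- main theorems -----

theorem try_build_initial_grid_spec : Claim_unchanged_try_build_initial_grid := by
  intro n pole _ hpre hnd
  by_cases hoor : ∃ j, j < n.toNat ∧ (pvPos pole j < 0 ∨ n ≤ pvPos pole j)
  · rw [B_cases, if_pos hoor]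
    apply A_eq_nil n pole hpre
    obtain ⟨j, h1, h2⟩ := hoor
    exact ⟨j, h1, by unfold pvBad; tauto⟩
  · push Not at hoor
    have hin : ∀ i, i < n.toNat → 0 ≤ pvPos pole i ∧ pvPos pole i < n := by
      intro i hi
      have := hoor i hi
      omega
    by_cases hdup : (pvPositions n pole).Nodup
    · rw [B_cases, if_neg (by push Not; intro j hj; have := hin j hj; omega), if_neg (by simpa using hdup)]
      apply A_eq_build n pole hpre
      apply A_ok_of_D_like n pole hin
      intro j hj i hij heq
      exact absurd heq ((nodup_pvPositions_iff n pole).mp hdup j hj i hij)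
    · rw [B_cases, if_neg (by push Not; intro j hj; have := hin j hj; omega), if_pos (by simpa using hdup)]
      -- some collision exists; since ¬D_, some colliding pair has a nonzero earlier car
      have hdup' : ∃ j, j < n.toNat ∧ ∃ i, i < j ∧ pvPos pole i = pvPos pole j := by
        have := (nodup_pvPositions_iff n pole).not.mp hdup
        push Not at this
        obtain ⟨j, hj, i, hij, heq⟩ := this
        exact ⟨j, hj, i, hij, heq⟩
      have hnz : ∃ j, j < n.toNat ∧ ∃ i, i < j ∧ pvPos pole i = pvPos pole j ∧ pvCar pole i ≠ 0 := by
        by_contra hall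
        push Not at hall
        apply hnd
        apply (D_iff n pole hpre).mpr
        refine ⟨hin, ?_, ?_⟩
        · obtain ⟨j, hj, i, hij, heq⟩ := hdup'
          exact ⟨j, hj, i, hij, heq⟩
        · intro j hj i hij heq
          exact hall j hj i hij heq
      exact A_eq_nil n pole hpre (bad_of_dupnz n pole hin hnz)

theorem try_build_initial_grid_tight : Claim_exact_try_build_initial_grid := by
  intro n pole _ hpre hD
  obtain ⟨hin, hdup, hz⟩ := (D_iff n pole hpre).mp hD
  have hin' : ∀ i, i < n.toNat → 0 ≤ pvPos pole i ∧ pvPos pole i < n := fun i hi => hin i hi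
  have hA : try_build_initial_grid n pole = pvBuild n pole n.toNat :=
    A_eq_build n pole hpre (A_ok_of_D_like n pole hin' (fun j hj i hij heq => hz j hj i hij heq))
  have hB : try_build_initial_grid_alt n pole = [] := by
    rw [B_cases, if_neg (by push Not; intro j hj; have := hin' j hj; omega)]
    rw [if_pos]
    rw [nodup_pvPositions_iff]
    push Not
    obtain ⟨j, hj, i, hij, heq⟩ := hdup
    exact ⟨j, hj, i, hij, heq⟩
  rw [hA, hB]
  intro hc
  have h1 : (pvBuild n pole n.toNat).length = n.toNat := pvBuild_length n pole n.toNat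
  obtain ⟨j, hj, _⟩ := hdup
  rw [hc] at h1
  simp at h1
  omega

-- ===== VERDICT (by name: the statement is the Claim_ definition above) =====
theorem try_build_initial_grid_changed : Claim_changed_try_build_initial_grid := by
  unfold Claim_changed_try_build_initial_grid; decide
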